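-- pv_equiv track=rewrite | github.com/lucianoscarpaci/Technical-Interview-Prep | Unit2/PartA/p5.py | best_set
-- ===== SOURCE A (Python) =====
-- def best_set(votes):
--     # Create a dictionary to store the number of votes for each candidate
--     vote_count = {}
--     for vote in votes.values():
--         if vote in vote_count:
--             vote_count[vote] += 1
--         else:
--             vote_count[vote] = 1
--
--     # Find the candidate with the most votes
--     max_votes = 0
--     best_candidates = []
--     # vote_count {'SZA': 3, 'Yo-Yo Ma': 1, 'Ethel Cain': 2}
--     for candidate, votes in vote_count.items():
--         if votes > max_votes:
--             max_votes = votes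
--             best_candidates = candidate
--         elif votes == max_votes:
--             best_candidates = candidate
--     # return the candidate(s) with the most votes
--     return best_candidates
-- ===== SOURCE B (Python) =====
-- def best_set(votes):
--     # Candidate with the most votes. Strategy: tally the values, then do ONE
--     # stable ascending sort of the (candidate, count) items by count and take
--     # the last item's key: stability keeps first-appearance order among equal
--     # counts, so the last element is exactly the last-in-insertion-order
--     # candidate with the maximum count, reproducing the running-scan tie-break.
--     counts = {}
--     for v in votes.values():
--         counts[v] = counts.get(v, 0) + 1
--     ranked = sorted(counts.items(), key=lambda kv: kv[1])
--     return ranked[-1][0] if ranked else []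
-- ===== Notes on version B (the rewrite author's own statement) =====
-- stated objective: alternative
-- what changed: Replaces A's running-max/tie scan over the count items by one stable ascending sort of the (candidate, count) items by count, returning the last element's key (stability makes the last element the last-in-insertion-order candidate with the maximum count).
-- outside the precondition, e.g. on best_set({}): A returns [], B returns []
import Mathlib
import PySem

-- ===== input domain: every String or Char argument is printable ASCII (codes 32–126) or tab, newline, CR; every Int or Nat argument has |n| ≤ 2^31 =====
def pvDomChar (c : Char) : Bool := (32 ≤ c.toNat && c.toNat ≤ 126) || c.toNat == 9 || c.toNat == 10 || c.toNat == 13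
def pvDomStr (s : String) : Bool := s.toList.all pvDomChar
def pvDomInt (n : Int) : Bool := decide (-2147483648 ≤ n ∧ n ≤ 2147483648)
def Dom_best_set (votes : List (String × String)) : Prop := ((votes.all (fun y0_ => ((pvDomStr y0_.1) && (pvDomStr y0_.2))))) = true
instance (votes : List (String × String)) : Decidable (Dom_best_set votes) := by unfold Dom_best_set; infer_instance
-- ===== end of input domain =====

-- B replaces A's running-max/tie scan over the count items by one stable ascending
-- sort of the (candidate, count) items by count, returning the last element's key (alternative).


-- ===== PORT A =====
-- Literal port of A. On empty input Python's best_candidates stays the list [],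
-- not a string; that input is outside Pre_ and the port's initial "" is only a totalization.
def best_set (votes : List (String × String)) : String :=
  let vote_count := (votes.map Prod.snd).foldl
    (fun d v =>
      if PySem.Dict.contains d v then
        PySem.Dict.insert d v (PySem.Dict.getD d v 0 + 1)
      else
        PySem.Dict.insert d v 1)
    PySem.Dict.empty
  let r := (PySem.Dict.items vote_count).foldl
    (fun (st : Int × String) cv =>
      if st.1 < cv.2 then (cv.2, cv.1)
      else if cv.2 == st.1 then (st.1, cv.1)
      else st)
    ((0 : Int), "")
  r.2

-- ===== PORT B =====
-- Port of Source B: tally with counts.get(v, 0) + 1, stable-sort the items by count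
-- ascending, answer = last item's key. Python's 'else []' branch (empty input) is
-- outside Pre_; the port returns "" there only to totalize.
def best_set_alt (votes : List (String × String)) : String :=
  let counts := (votes.map Prod.snd).foldl
    (fun (d : PySem.Dict String Int) v => PySem.Dict.insert d v (PySem.Dict.getD d v 0 + 1))
    PySem.Dict.empty
  let ranked := PySem.List.sorted (PySem.Dict.items counts) (fun kv => kv.2) false
  match PySem.List.pyGet? ranked (-1) with
  | some kv => kv.1
  | none => ""

-- ===== PRECONDITION & SPEC =====
-- Pre_ excludes the empty dict, on which A returns the list [] (not a string value);
-- and it requires distinct keys, as any actual Python dict argument has by construction.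
def Pre_best_set (votes : List (String × String)) : Prop :=
  votes ≠ [] ∧ (votes.map Prod.fst).Nodup
instance (votes : List (String × String)) : Decidable (Pre_best_set votes) := by
  unfold Pre_best_set; infer_instance
def pvWitness_best_set : (List (String × String)) :=
  [("v1", "SZA"), ("v2", "Yo-Yo Ma"), ("v3", "SZA")]
def Spec_best_set (votes : List (String × String)) (out : String) : Prop := out = best_set_alt votes
instance (votes : List (String × String)) (out : String) : Decidable (Spec_best_set votes out) := by unfold Spec_best_set; infer_instance

-- ===== CLAIM (what is proved, stated in full; the proofs are below) =====
def Claim_equal_best_set : Prop := ∀ (votes : List (String × String)), Dom_best_set votes → Pre_best_set votes → Spec_best_set votes (best_set votes)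

-- ===== LEMMAS AND PROOFS =====

-- A's counting loop is Counter(votes.values()); B's counting loop is the getD-form rfl.
lemma count_fold_eq_counter (vals : List String) :
    vals.foldl
      (fun d v =>
        if PySem.Dict.contains d v then
          PySem.Dict.insert d v (PySem.Dict.getD d v 0 + 1)
        else
          PySem.Dict.insert d v 1)
      PySem.Dict.empty = PySem.Dict.counter vals := by
  rw [← PySem.Dict.foldl_insert_getD_add_one_eq_counter]
  apply PySem.List.foldl_congr_mem
  intro d v _
  by_cases h : PySem.Dict.contains d v
  · simp [h]
  · simp only [Bool.not_eq_true] at h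
    simp [h, PySem.Dict.getD_of_not_contains d 0 h]

-- max? on a cons, as a match on max? of the tail (first maximum wins).
lemma max?_cons {α : Type} (key : α → Int) (c : α) (t : List α) :
    PySem.List.max? (c :: t) key =
      some (match PySem.List.max? t key with
            | none => c
            | some m => if key c < key m then m else c) := by
  induction t generalizing c with
  | nil => rfl
  | cons y t ih =>
    have h1 : PySem.List.max? (c :: y :: t) key
        = PySem.List.max? ((if key c < key y then y else c) :: t) key := by
      by_cases hcy : key c < key y <;> simp [PySem.List.max?, List.foldl, hcy]
    rw [h1, ih]
    rw [ih y]
    rcases hmt : PySem.List.max? t key with _ | m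
    · rfl
    · simp only
      split_ifs <;> first | rfl | omega

-- max? commutes with map when the key is read through the map.
lemma max?_map_aux {α β : Type} (f : α → β) (key : β → Int) (l : List α) (acc : Option α) :
    l.foldl
      (fun (a : Option β) x =>
        match a with
        | none => some (f x)
        | some m => if key m < key (f x) then some (f x) else some m)
      (acc.map f)
    = (l.foldl
        (fun (a : Option α) x =>
          match a with
          | none => some x
          | some m => if key (f m) < key (f x) then some x else some m)
        acc).map f := by
  induction l generalizing acc with
  | nil => rfl
  | cons x t ih =>
    cases acc with
    | none => simpa using ih (some x)
    | some m =>
      simp only [List.foldl, Option.map_some]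
      by_cases h : key (f m) < key (f x)
      · simpa [h] using ih (some x)
      · simpa [h] using ih (some m)

lemma max?_map {α β : Type} (f : α → β) (key : β → Int) (l : List α) :
    PySem.List.max? (l.map f) key = (PySem.List.max? l (fun x => key (f x))).map f := by
  unfold PySem.List.max?
  rw [List.foldl_map]
  simpa using max?_map_aux f key l none

-- insertBy never produces the empty list.
lemma insertBy_ne_nil {α : Type} (before : α → α → Bool) (c : α) (s : List α) :
    PySem.List.insertBy before c s ≠ [] := by
  cases s with
  | nil => simp [PySem.List.insertBy]
  | cons y t => by_cases h : before c y <;> simp [PySem.List.insertBy, h]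

-- Inserting into an ascending (by key) list: the new last element is c exactly
-- when c's key is ≥ the old last's key (stability: ties land after the old last).
lemma getLast?_insertBy {α : Type} (key : α → Int) (c : α) (s : List α)
    (hs : s.Pairwise (fun a b => key a ≤ key b)) :
    (PySem.List.insertBy (fun a b => decide (key a < key b)) c s).getLast? =
      some (match s.getLast? with
            | none => c
            | some m => if key c < key m then m else c) := by
  induction s with
  | nil => rfl
  | cons y t ih =>
    rcases List.pairwise_cons.mp hs with ⟨hy, ht⟩
    by_cases h : key c < key y
    · simp only [PySem.List.insertBy, h, decide_true, if_true]
      rw [List.getLast?_cons_cons]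
      cases ht' : t.getLast? with
      | none =>
        rcases List.getLast?_eq_none_iff.mp ht' with rfl
        simp [h]
      | some m =>
        have hm : m ∈ t := List.mem_of_getLast? ht'
        have hym : key y ≤ key m := hy m hm
        have hcm : key c < key m := lt_of_lt_of_le h hym
        cases t with
        | nil => simp at ht'
        | cons z u =>
          rw [List.getLast?_cons_cons, ht']
          simp [hcm]
    · simp only [PySem.List.insertBy, h, decide_false, Bool.false_eq_true, if_false]
      have h' := ih ht
      rcases hne : PySem.List.insertBy (fun a b => decide (key a < key b)) c t with _ | ⟨z, u⟩
      · exact absurd hne (insertBy_ne_nil _ _ _)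
      · rw [hne] at h'
        rw [List.getLast?_cons_cons, h']
        cases ht' : t.getLast? with
        | none =>
          rcases List.getLast?_eq_none_iff.mp ht' with rfl
          simp [h]
        | some m =>
          cases t with
          | nil => simp at ht'
          | cons z' u' => rw [List.getLast?_cons_cons, ht']

-- The last element of the stable ascending sort is the first maximum of the
-- reversed list (= the last input element attaining the maximal key).
lemma getLast?_sorted_eq_max?_rev {α : Type} (key : α → Int) (xs : List α) :
    (PySem.List.sorted xs key false).getLast?
      = PySem.List.max? xs.reverse key := by
  induction xs using List.reverseRecOn with
  | nil => rfl
  | append_singleton l c ih =>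
    rw [PySem.List.sorted_eq_foldl_insertBy, List.foldl_append, List.foldl_cons, List.foldl_nil,
        ← PySem.List.sorted_eq_foldl_insertBy]
    rw [getLast?_insertBy key c _ (PySem.List.sorted_pairwise l key)]
    rw [ih]
    rw [List.reverse_append]
    simp only [List.reverse_cons, List.reverse_nil, List.nil_append, List.singleton_append]
    rw [max?_cons]

-- A's running-max/tie scan over (k, cnt k) pairs picks exactly the first maximum
-- of the reversed key list (with its count as the max accumulator).
lemma scan_eq (cnt : String → Int) (l : List String) (hpos : ∀ x ∈ l, 1 ≤ cnt x) :
    l.foldl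
      (fun (st : Int × String) k =>
        if st.1 < cnt k then (cnt k, k)
        else if (cnt k == st.1) then (st.1, k)
        else st)
      ((0 : Int), "")
    = ((PySem.List.max? l.reverse cnt).elim 0 (fun m => cnt m),
       (PySem.List.max? l.reverse cnt).getD "") := by
  induction l using List.reverseRecOn with
  | nil => rfl
  | append_singleton l c ih =>
    rw [List.foldl_append]
    rw [ih (fun x hx => hpos x (by simp [hx]))]
    rw [List.reverse_append]
    simp only [List.reverse_cons, List.reverse_nil, List.nil_append, List.singleton_append]
    rw [max?_cons]
    rcases hm : PySem.List.max? l.reverse cnt with _ | m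
    · have hc : 1 ≤ cnt c := hpos c (by simp)
      simp only [Option.elim, Option.getD]
      have h0 : (0 : Int) < cnt c := by omega
      simp [h0]
    · simp only [Option.elim, Option.getD]
      by_cases h1 : cnt m < cnt c
      · have h1' : ¬ cnt c < cnt m := by omega
        simp [h1, h1']
      · by_cases h2 : cnt c = cnt m
        · have h2' : ¬ cnt m < cnt c := by omega
          simp [h2]
        · have h3 : cnt c < cnt m := by omega
          simp [h1, h2, h3]

-- ===== VERDICT (by name: the statement is the Claim_ definition above) =====
theorem best_set_spec : Claim_equal_best_set := by
  intro votes _ _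
  unfold Spec_best_set best_set best_set_alt
  simp only [count_fold_eq_counter, PySem.Dict.foldl_insert_getD_add_one_eq_counter,
    PySem.Dict.items_counter]
  rw [List.foldl_map]
  rw [scan_eq (fun k => (List.count k (votes.map Prod.snd) : Int)) _
      (fun x hx => by
        have : 0 < List.count x (votes.map Prod.snd) :=
          List.count_pos_iff.mpr ((PySem.Set.mem_ofList _ x).mp hx)
        show (1:Int) ≤ (List.count x (votes.map Prod.snd) : Int)
        exact_mod_cast this)]
  rw [PySem.List.pyGet?_neg_one]
  rw [getLast?_sorted_eq_max?_rev (fun kv : String × Int => kv.2)]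
  rw [← List.map_reverse]
  rw [max?_map (fun k => (k, (List.count k (votes.map Prod.snd) : Int))) (fun kv => kv.2)]
  cases PySem.List.max? (List.reverse (PySem.Set.ofList (votes.map Prod.snd)))
      (fun k => (List.count k (votes.map Prod.snd) : Int)) <;> simp
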